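-- pv_equiv track=rewrite | github.com/gnragazzi/project_euler | problema_32/p.py | esProductoPandigital
-- ===== SOURCE A (Python) =====
-- digitosDecimales = [x for x in range(1,10)]
--
-- def esProductoPandigital(x,y,z):
--     aux = digitosDecimales[:]
--     for n in x:
--         if n not in aux:
--             return False
--         aux.remove(n)
--     for n in y:
--         if n not in aux:
--             return False
--         aux.remove(n)
--     for n in z:
--         if n not in aux:
--             return False
--         aux.remove(n)
--     return True
-- ===== SOURCE B (Python) =====
-- def esProductoPandigital(x, y, z):
--     combined = list(x) + list(y) + list(z)
--     return all(1 <= n <= 9 for n in combined) and all(combined.count(n) == 1 for n in combined)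
-- ===== Notes on version B (the rewrite author's own statement) =====
-- stated objective: simpler
-- what changed: Replaces the three sequential scan-and-remove loops over a shrinking copy of digitosDecimales by building the concatenation once and checking range membership and duplicate-freeness (count == 1) directly on it.
import Mathlib
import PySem

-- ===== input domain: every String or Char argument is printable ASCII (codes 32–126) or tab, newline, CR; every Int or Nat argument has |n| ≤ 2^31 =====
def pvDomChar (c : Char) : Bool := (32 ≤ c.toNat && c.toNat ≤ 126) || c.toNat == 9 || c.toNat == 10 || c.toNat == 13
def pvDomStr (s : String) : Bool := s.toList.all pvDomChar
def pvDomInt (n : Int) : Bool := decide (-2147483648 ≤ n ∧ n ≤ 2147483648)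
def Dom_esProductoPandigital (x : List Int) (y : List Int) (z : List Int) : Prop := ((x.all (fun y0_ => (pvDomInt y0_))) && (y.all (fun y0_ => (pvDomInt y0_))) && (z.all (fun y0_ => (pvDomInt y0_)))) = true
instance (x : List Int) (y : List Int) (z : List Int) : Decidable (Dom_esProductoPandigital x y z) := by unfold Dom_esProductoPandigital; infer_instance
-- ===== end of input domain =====

-- B builds the concatenation once and checks range membership plus duplicate-freeness (count == 1),
-- instead of A's three scan-and-remove loops over a shrinking copy of digitosDecimales (objective: simpler).

-- ===== PORT A =====
def digitosDecimales : List Int := [1, 2, 3, 4, 5, 6, 7, 8, 9]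

-- one of A's loops: walk the list, early-return False becomes `none`; `aux.remove(n)` after a
-- membership check removes the first occurrence = List.erase (exact here since n ∈ aux is checked)
def pvLoopA : List Int → List Int → Option (List Int)
  | [], aux => some aux
  | n :: ns, aux => if n ∈ aux then pvLoopA ns (aux.erase n) else none

def esProductoPandigital (x : List Int) (y : List Int) (z : List Int) : Bool :=
  -- aux = digitosDecimales[:]
  match pvLoopA x digitosDecimales with
  | none => false
  | some aux1 =>
    match pvLoopA y aux1 with
    | none => false
    | some aux2 =>
      match pvLoopA z aux2 with
      | none => false
      | some _ => true

-- ===== PORT B =====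
def esProductoPandigital_alt (x : List Int) (y : List Int) (z : List Int) : Bool :=
  let combined := x ++ y ++ z
  combined.all (fun n => decide (1 ≤ n) && decide (n ≤ 9)) &&
    combined.all (fun n => combined.count n == 1)

-- ===== PRECONDITION & SPEC =====
def Spec_esProductoPandigital (x : List Int) (y : List Int) (z : List Int) (out : Bool) : Prop := out = esProductoPandigital_alt x y z
instance (x : List Int) (y : List Int) (z : List Int) (out : Bool) : Decidable (Spec_esProductoPandigital x y z out) := by unfold Spec_esProductoPandigital; infer_instance

-- ===== CLAIM (what is proved, stated in full; the proofs are below) =====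
def Claim_equal_esProductoPandigital : Prop := ∀ (x : List Int) (y : List Int) (z : List Int), Dom_esProductoPandigital x y z → Spec_esProductoPandigital x y z (esProductoPandigital x y z)

-- ===== LEMMAS AND PROOFS =====

theorem pvLoopA_append (ns ms aux : List Int) :
    pvLoopA (ns ++ ms) aux = (pvLoopA ns aux).bind (pvLoopA ms) := by
  induction ns generalizing aux with
  | nil => simp [pvLoopA]
  | cons n ns ih =>
    simp only [List.cons_append, pvLoopA]
    split
    · exact ih _
    · rfl

theorem pvLoopA_char (ns : List Int) : ∀ aux : List Int, aux.Nodup →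
    ((pvLoopA ns aux).isSome = true ↔ ns.Nodup ∧ ∀ n ∈ ns, n ∈ aux) ∧
    (∀ aux', pvLoopA ns aux = some aux' → aux'.Nodup) := by
  induction ns with
  | nil =>
    intro aux h
    refine ⟨by simp [pvLoopA], ?_⟩
    intro aux' haux'
    simp [pvLoopA] at haux'
    exact haux' ▸ h
  | cons n ns ih =>
    intro aux h
    by_cases hn : n ∈ aux
    · have herase : (aux.erase n).Nodup := h.erase n
      obtain ⟨ih1, ih2⟩ := ih (aux.erase n) herase
      constructor
      · simp only [pvLoopA, if_pos hn]
        rw [ih1]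
        constructor
        · rintro ⟨hnd, hmem⟩
          have hmem' : ∀ m ∈ ns, m ∈ aux ∧ m ≠ n := by
            intro m hm
            have := hmem m hm
            rw [List.Nodup.mem_erase_iff h] at this
            exact ⟨this.2, this.1⟩
          refine ⟨List.nodup_cons.mpr ⟨fun hc => (hmem' n hc).2 rfl, hnd⟩, ?_⟩
          intro m hm
          rcases List.mem_cons.mp hm with rfl | hm
          · exact hn
          · exact (hmem' m hm).1
        · rintro ⟨hnd, hmem⟩
          rw [List.nodup_cons] at hnd
          refine ⟨hnd.2, fun m hm => ?_⟩
          rw [List.Nodup.mem_erase_iff h]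
          exact ⟨fun hc => hnd.1 (hc ▸ hm), hmem m (List.mem_cons_of_mem _ hm)⟩
      · intro aux' haux'
        simp only [pvLoopA, if_pos hn] at haux'
        exact ih2 aux' haux'
    · simp only [pvLoopA, if_neg hn]
      exact ⟨by simp [hn], by simp⟩

theorem digitos_nodup : digitosDecimales.Nodup := by decide

theorem mem_digitos (n : Int) : n ∈ digitosDecimales ↔ 1 ≤ n ∧ n ≤ 9 := by
  simp only [digitosDecimales, List.mem_cons, List.not_mem_nil, or_false]
  omega

theorem esProductoPandigital_eq_loop (x y z : List Int) :
    esProductoPandigital x y z = (pvLoopA (x ++ y ++ z) digitosDecimales).isSome := by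
  simp only [esProductoPandigital, pvLoopA_append]
  rcases hx : pvLoopA x digitosDecimales with _ | aux1
  · simp
  · rcases hy : pvLoopA y aux1 with _ | aux2
    · simp [hy]
    · rcases hz : pvLoopA z aux2 with _ | aux3 <;> simp [hy, hz]

-- ===== VERDICT (by name: the statement is the Claim_ definition above) =====
theorem esProductoPandigital_spec : Claim_equal_esProductoPandigital := by
  intro x y z _
  unfold Spec_esProductoPandigital esProductoPandigital_alt
  rw [esProductoPandigital_eq_loop]
  have hchar := (pvLoopA_char (x ++ y ++ z) digitosDecimales digitos_nodup).1
  rw [Bool.eq_iff_iff, hchar]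
  simp only [Bool.and_eq_true, List.all_eq_true, beq_iff_eq, Bool.and_eq_true, decide_eq_true_eq]
  rw [List.nodup_iff_count_eq_one]
  constructor
  · rintro ⟨hnd, hmem⟩
    exact ⟨fun n hn => (mem_digitos n).mp (hmem n hn), hnd⟩
  · rintro ⟨hrange, hcnt⟩
    exact ⟨hcnt, fun n hn => (mem_digitos n).mpr (hrange n hn)⟩
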